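-- pv_equiv track=rewrite | github.com/ValentinDobrynin/Life-Admin-Agent | modules/cards.py | _file_summary
-- ===== SOURCE A (Python) =====
-- from typing import Any
--
-- def _file_summary(files: list[dict[str, Any]]) -> str:
--     if not files:
--         return "Файлы: —"
--     photos = sum(1 for f in files if (f.get("content_type") or "").startswith("image/"))
--     pdfs = sum(1 for f in files if (f.get("content_type") or "") == "application/pdf")
--     others = len(files) - photos - pdfs
--     parts: list[str] = []
--     if photos:
--         parts.append(f"{photos} фото")
--     if pdfs:
--         parts.append(f"{pdfs} PDF")
--     if others:
--         parts.append(f"{others} файл(ов)")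
--     return "Файлы: " + ", ".join(parts) if parts else "Файлы: —"
-- ===== SOURCE B (Python) =====
-- def _file_summary(files: list) -> str:
--     if not files:
--         return "Файлы: —"
--     photos = pdfs = others = 0
--     for f in files:
--         ct = f.get("content_type") or ""
--         if ct.startswith("image/"):
--             photos += 1
--         elif ct == "application/pdf":
--             pdfs += 1
--         else:
--             others += 1
--     parts = []
--     if photos:
--         parts.append(f"{photos} фото")
--     if pdfs:
--         parts.append(f"{pdfs} PDF")
--     if others:
--         parts.append(f"{others} файл(ов)")
--     return "Файлы: " + ", ".join(parts)
-- ===== Notes on version B (the rewrite author's own statement) =====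
-- stated objective: simpler
-- what changed: Replaces A's three separate passes (two counting comprehensions plus a length subtraction) with one classification loop that puts each file into exactly one of three counters, then formats; the unreachable empty-parts fallback is dropped.
import Mathlib
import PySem

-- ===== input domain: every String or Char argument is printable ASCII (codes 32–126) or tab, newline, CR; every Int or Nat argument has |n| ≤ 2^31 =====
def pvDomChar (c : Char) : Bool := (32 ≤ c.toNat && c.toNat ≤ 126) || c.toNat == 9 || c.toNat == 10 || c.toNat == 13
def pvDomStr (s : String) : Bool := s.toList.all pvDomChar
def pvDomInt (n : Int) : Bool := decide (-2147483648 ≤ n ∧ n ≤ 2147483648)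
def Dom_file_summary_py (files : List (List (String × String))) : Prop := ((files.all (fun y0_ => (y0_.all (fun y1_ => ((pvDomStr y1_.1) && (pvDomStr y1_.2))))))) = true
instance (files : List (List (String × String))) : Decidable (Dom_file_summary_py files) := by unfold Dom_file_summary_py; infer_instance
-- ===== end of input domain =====

-- B replaces A's three separate counting passes by one classification loop into three counters (same output; 'simpler' decomposition).


-- ===== PORT A =====
-- (f.get("content_type") or ""): a missing key (None) and a falsy "" value both yield ""
def pvCT (f : List (String × String)) : String :=
  PySem.Dict.getD ⟨f⟩ "content_type" ""

def pvIsPhoto (f : List (String × String)) : Bool :=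
  PySem.Str.startswith (pvCT f) "image/"

def pvIsPdf (f : List (String × String)) : Bool :=
  pvCT f == "application/pdf"

def file_summary_py (files : List (List (String × String))) : String :=
  if files = [] then "Файлы: —"
  else
    let photos : Int := (files.countP pvIsPhoto : Int)
    let pdfs : Int := (files.countP pvIsPdf : Int)
    let others : Int := (files.length : Int) - photos - pdfs
    let parts : List String :=
      (if photos ≠ 0 then [PySem.Int.toStr photos ++ " фото"] else []) ++
      (if pdfs ≠ 0 then [PySem.Int.toStr pdfs ++ " PDF"] else []) ++
      (if others ≠ 0 then [PySem.Int.toStr others ++ " файл(ов)"] else [])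
    if parts ≠ [] then "Файлы: " ++ PySem.Str.join ", " parts else "Файлы: —"

-- ===== PORT B =====
-- one pass: classify each file into exactly one of (photos, pdfs, others)
def pvStep (c : Int × Int × Int) (f : List (String × String)) : Int × Int × Int :=
  let ct := pvCT f
  if PySem.Str.startswith ct "image/" then (c.1 + 1, c.2.1, c.2.2)
  else if ct == "application/pdf" then (c.1, c.2.1 + 1, c.2.2)
  else (c.1, c.2.1, c.2.2 + 1)

def file_summary_py_alt (files : List (List (String × String))) : String :=
  if files = [] then "Файлы: —"
  else
    let c := files.foldl pvStep (0, 0, 0)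
    let parts : List String :=
      (if c.1 ≠ 0 then [PySem.Int.toStr c.1 ++ " фото"] else []) ++
      (if c.2.1 ≠ 0 then [PySem.Int.toStr c.2.1 ++ " PDF"] else []) ++
      (if c.2.2 ≠ 0 then [PySem.Int.toStr c.2.2 ++ " файл(ов)"] else [])
    "Файлы: " ++ PySem.Str.join ", " parts

-- ===== PRECONDITION & SPEC =====
def Spec_file_summary_py (files : List (List (String × String))) (out : String) : Prop := out = file_summary_py_alt files
instance (files : List (List (String × String))) (out : String) : Decidable (Spec_file_summary_py files out) := by unfold Spec_file_summary_py; infer_instance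

-- ===== CLAIM (what is proved, stated in full; the proofs are below) =====
def Claim_equal_file_summary_py : Prop := ∀ (files : List (List (String × String))), Dom_file_summary_py files → Spec_file_summary_py files (file_summary_py files)

-- ===== LEMMAS AND PROOFS =====

-- a file whose content type is exactly "application/pdf" does not start with "image/"
lemma pvPdf_not_photo (f : List (String × String)) (h : pvIsPdf f = true) : pvIsPhoto f = false := by
  unfold pvIsPdf at h
  have hct : pvCT f = "application/pdf" := by
    simpa using h
  unfold pvIsPhoto
  rw [hct]
  decide

lemma pvStep_eq (c : Int × Int × Int) (f : List (String × String)) :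
    pvStep c f =
      (if pvIsPhoto f then (c.1 + 1, c.2.1, c.2.2)
       else if pvIsPdf f then (c.1, c.2.1 + 1, c.2.2)
       else (c.1, c.2.1, c.2.2 + 1)) := rfl

lemma pvFold_counts (files : List (List (String × String))) :
    ∀ a b c : Int,
      files.foldl pvStep (a, b, c) =
        (a + (files.countP pvIsPhoto : Int),
         b + (files.countP pvIsPdf : Int),
         c + ((files.length : Int) - (files.countP pvIsPhoto : Int) - (files.countP pvIsPdf : Int))) := by
  induction files with
  | nil => intro a b c; simp
  | cons f fs ih =>
      intro a b c
      simp only [List.foldl_cons, pvStep_eq, List.countP_cons, List.length_cons]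
      by_cases hph : pvIsPhoto f = true
      · have hpdf : pvIsPdf f = false := by
          cases h : pvIsPdf f
          · rfl
          · exact absurd hph (by simp [pvPdf_not_photo f h])
        rw [if_pos hph, ih]
        simp [hph, hpdf, Prod.ext_iff]
        all_goals omega
      · have hph' : pvIsPhoto f = false := by simpa using hph
        rw [if_neg (by simp [hph'])]
        by_cases hpdf : pvIsPdf f = true
        · rw [if_pos hpdf, ih]
          simp [hph', hpdf, Prod.ext_iff]
          all_goals omega
        · have hpdf' : pvIsPdf f = false := by simpa using hpdf
          rw [if_neg (by simp [hpdf']), ih]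
          simp [hph', hpdf', Prod.ext_iff]
          all_goals omega

-- ===== VERDICT (by name: the statement is the Claim_ definition above) =====
theorem file_summary_py_spec : Claim_equal_file_summary_py := by
  intro files _
  unfold Spec_file_summary_py file_summary_py file_summary_py_alt
  by_cases hnil : files = []
  · simp [hnil]
  · rw [if_neg hnil, if_neg hnil]
    rw [pvFold_counts files 0 0 0]
    simp only [zero_add]
    have hlen : files.length ≠ 0 := by
      simpa [List.length_eq_zero_iff] using hnil
    set photos : Int := (files.countP pvIsPhoto : Int) with hphotos
    set pdfs : Int := (files.countP pvIsPdf : Int) with hpdfs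
    set others : Int := (files.length : Int) - photos - pdfs with hothers
    -- the three buckets cover the whole (nonempty) list, so parts is never empty
    have hcount_p : files.countP pvIsPhoto ≤ files.length := List.countP_le_length
    have hcount_q : files.countP pvIsPdf ≤ files.length := List.countP_le_length
    by_cases h1 : photos = 0
    · by_cases h2 : pdfs = 0
      · have h3 : others ≠ 0 := by
          rw [hothers]
          omega
        simp [h1, h2, h3]
      · simp [h2]
    · simp [h1]
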